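-- pv_equiv track=rewrite | github.com/Shwetha-75/Leet-Code-problems | Strings/BoredChef.py | bored_chef
-- ===== SOURCE A (Python) =====
-- def bored_chef(k:int,s: str) -> int:
--     strings=list(s)
--     strings.sort()
--     def helper(string:list[str]):
--         for i in range(len(string)-1):
--             if string[i]!=string[i+1]:
--                return 0
--         return 1
--     for i in range(len(strings)-k+1):
--         if helper(strings[i:i+k:])==1:
--             return 1
--     return 0
-- ===== SOURCE B (Python) =====
-- def bored_chef(k: int, s: str) -> int:
--     best = max((s.count(c) for c in set(s)), default=0)
--     return 1 if best >= k else 0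
-- ===== Notes on version B (the rewrite author's own statement) =====
-- stated objective: simpler
-- what changed: Replaces A's sort-then-slide-a-window-of-k-equal-adjacent-characters with a direct maximum character frequency: count each distinct character once and compare the maximum count (default 0) with k.
import Mathlib
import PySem

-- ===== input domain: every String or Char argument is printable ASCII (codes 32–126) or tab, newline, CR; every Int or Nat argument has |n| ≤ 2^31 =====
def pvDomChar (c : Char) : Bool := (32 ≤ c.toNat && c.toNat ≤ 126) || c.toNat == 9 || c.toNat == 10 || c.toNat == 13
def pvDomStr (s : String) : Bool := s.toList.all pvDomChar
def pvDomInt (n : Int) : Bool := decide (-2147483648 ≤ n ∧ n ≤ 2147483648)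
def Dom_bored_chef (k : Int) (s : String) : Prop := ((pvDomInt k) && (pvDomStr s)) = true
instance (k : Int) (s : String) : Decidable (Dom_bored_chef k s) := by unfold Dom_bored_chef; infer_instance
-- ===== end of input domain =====

-- B replaces A's sort + sliding window of k equal adjacent characters by a direct
-- maximum-character-frequency computation (count each distinct character once); simpler, same results.


-- ===== PORT A =====
-- helper(string): scans adjacent pairs, returns 0 on a mismatch, else 1
def pvHelperA : List Char → Int
  | a :: b :: t => if a ≠ b then 0 else pvHelperA (b :: t)
  | _ => 1

-- the 'for i in range(len(strings)-k+1)' loop with its early 'return 1':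
-- iterated with a fuel counter (the number of remaining indices) and the current index i
def pvLoopA (strings : List Char) (k : Int) : Nat → Int → Int
  | 0, _ => 0
  | fuel + 1, i =>
      if pvHelperA (PySem.List.slice strings (some i) (some (i + k))) = 1 then 1
      else pvLoopA strings k fuel (i + 1)

def bored_chef (k : Int) (s : String) : Int :=
  let strings := PySem.List.sorted s.toList (fun c => c) false
  pvLoopA strings k ((strings.length : Int) - k + 1).toNat 0

-- ===== PORT B =====
def bored_chef_alt (k : Int) (s : String) : Int :=
  let best : Int :=
    ((PySem.Set.ofList s.toList).map (fun c => (PySem.List.count s.toList c : Int))).foldl max 0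
  if k ≤ best then 1 else 0

-- ===== PRECONDITION & SPEC =====
def Spec_bored_chef (k : Int) (s : String) (out : Int) : Prop := out = bored_chef_alt k s
instance (k : Int) (s : String) (out : Int) : Decidable (Spec_bored_chef k s out) := by unfold Spec_bored_chef; infer_instance

-- ===== CLAIM (what is proved, stated in full; the proofs are below) =====
def Claim_equal_bored_chef : Prop := ∀ (k : Int) (s : String), Dom_bored_chef k s → Spec_bored_chef k s (bored_chef k s)

-- ===== LEMMAS AND PROOFS =====

-- shared characterisation: "some character occurs at least k times (vacuously if k ≤ 0)"
def pvP (k : Int) (l : List Char) : Prop := k ≤ 0 ∨ ∃ c ∈ l, k ≤ (l.count c : Int)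

lemma le_foldl_max (xs : List Int) (a k : Int) :
    k ≤ xs.foldl max a ↔ k ≤ a ∨ ∃ x ∈ xs, k ≤ x := by
  induction xs generalizing a with
  | nil => simp
  | cons x xs ih =>
      rw [List.foldl_cons, ih, le_max_iff]
      constructor
      · rintro ((h | h) | ⟨y, hy, h⟩)
        · exact Or.inl h
        · exact Or.inr ⟨x, List.mem_cons_self, h⟩
        · exact Or.inr ⟨y, List.mem_cons_of_mem _ hy, h⟩
      · rintro (h | ⟨y, hy, h⟩)
        · exact Or.inl (Or.inl h)
        · rcases List.mem_cons.mp hy with rfl | hy2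
          · exact Or.inl (Or.inr h)
          · exact Or.inr ⟨y, hy2, h⟩

lemma altB_iff (k : Int) (s : String) : bored_chef_alt k s = 1 ↔ pvP k s.toList := by
  unfold bored_chef_alt pvP
  have h : (k ≤ ((PySem.Set.ofList s.toList).map
            (fun c => (PySem.List.count s.toList c : Int))).foldl max 0) ↔
          (k ≤ 0 ∨ ∃ c ∈ s.toList, k ≤ (s.toList.count c : Int)) := by
    rw [le_foldl_max]
    simp [PySem.List.count_eq, PySem.Set.mem_ofList]
  simp only []
  split_ifs with h1
  · simp [h.mp h1]
  · simp only [show ¬ (k ≤ 0 ∨ ∃ c ∈ s.toList, k ≤ (s.toList.count c : Int)) from fun hx => h1 (h.mpr hx)]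
    norm_num

lemma altB_ne (k : Int) (s : String) (h : ¬ pvP k s.toList) : bored_chef_alt k s = 0 := by
  unfold bored_chef_alt
  have h1 : ¬ (k ≤ ((PySem.Set.ofList s.toList).map
      (fun c => (PySem.List.count s.toList c : Int))).foldl max 0) := by
    intro hle
    apply h
    unfold pvP
    rw [le_foldl_max] at hle
    rcases hle with h0 | ⟨x, hx, hkx⟩
    · exact Or.inl h0
    · obtain ⟨c, hc, rfl⟩ := List.mem_map.mp hx
      exact Or.inr ⟨c, (PySem.Set.mem_ofList _ _).mp hc, by simpa [PySem.List.count_eq] using hkx⟩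
  simp only [if_neg h1]

lemma helper_replicate (m : Nat) (c : Char) : pvHelperA (List.replicate m c) = 1 := by
  induction m with
  | zero => rfl
  | succ n ih =>
      cases n with
      | zero => rfl
      | succ p =>
          simp only [List.replicate_succ] at ih ⊢
          simpa [pvHelperA] using ih

lemma helper_all_eq : ∀ (w : List Char), pvHelperA w = 1 → ∀ a ∈ w, ∀ b ∈ w, a = b := by
  intro w
  induction w with
  | nil => intro _ a ha; simp at ha
  | cons x t ih =>
      cases t with
      | nil => intro _ a ha b hb; simp at ha hb; simp [ha, hb]
      | cons y t2 =>
          intro h a ha b hb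
          have hxy : x = y := by
            by_contra hne
            simp [pvHelperA, hne] at h
          have h2 : pvHelperA (y :: t2) = 1 := by
            simpa [pvHelperA, hxy] using h
          have key : ∀ a ∈ (y :: t2), ∀ b ∈ (y :: t2), a = b := ih h2
          rcases List.mem_cons.mp ha with rfl | ha2
          · rcases List.mem_cons.mp hb with rfl | hb2
            · rfl
            · exact hxy.trans (key y (List.mem_cons_self) b hb2)
          · rcases List.mem_cons.mp hb with rfl | hb2
            · exact (hxy.trans (key y (List.mem_cons_self) a ha2)).symm
            · exact key a ha2 b hb2

lemma take_sorted_replicate : ∀ (t : List Char) (c : Char) (m : Nat),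
    t.Pairwise (· ≤ ·) → m ≤ t.count c → (∀ b ∈ t, c ≤ b) →
    m ≤ t.length ∧ t.take m = List.replicate m c := by
  intro t
  induction t with
  | nil =>
      intro c m _ hm _
      simp at hm
      simp [hm]
  | cons a rest ih =>
      intro c m hp hm hge
      rcases List.pairwise_cons.mp hp with ⟨hhead, htail⟩
      cases m with
      | zero => simp
      | succ p =>
          have hac : a = c := by
            by_contra hne
            have hca : c < a := lt_of_le_of_ne (hge a List.mem_cons_self) (fun h => hne h.symm)
            have hzero : (a :: rest).count c = 0 := by
              rw [List.count_eq_zero]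
              intro hmem
              rcases List.mem_cons.mp hmem with rfl | h2
              · exact absurd rfl hne
              · exact absurd (hhead c h2) (not_le.mpr hca)
            omega
          subst hac
          have hcount : p ≤ rest.count a := by
            have : (a :: rest).count a = rest.count a + 1 := by simp
            omega
          have := ih a p htail hcount (fun b hb => hhead b hb)
          refine ⟨by simpa using Nat.succ_le_succ this.1, ?_⟩
          simp [List.take_succ_cons, List.replicate_succ, this.2]

lemma window_of_count : ∀ (t : List Char) (c : Char) (m : Nat),
    t.Pairwise (· ≤ ·) → m ≤ t.count c →
    ∃ n, n + m ≤ t.length ∧ (t.drop n).take m = List.replicate m c := by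
  intro t
  induction t with
  | nil =>
      intro c m _ hm
      simp at hm
      exact ⟨0, by simp [hm]⟩
  | cons a rest ih =>
      intro c m hp hm
      rcases List.pairwise_cons.mp hp with ⟨hhead, htail⟩
      by_cases hac : a = c
      · subst hac
        have hge : ∀ b ∈ (a :: rest), a ≤ b := by
          intro b hb
          rcases List.mem_cons.mp hb with rfl | h2
          · exact le_refl _
          · exact hhead b h2
        have := take_sorted_replicate (a :: rest) a m hp hm hge
        exact ⟨0, by simpa using this.1, by simpa using this.2⟩
      · have hcount : m ≤ rest.count c := by
          have : (a :: rest).count c = rest.count c := by simp [hac]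
          omega
        obtain ⟨n, hn, hw⟩ := ih c m htail hcount
        exact ⟨n + 1, by simp; omega, by simpa using hw⟩

lemma loopA_eq (t : List Char) (k : Int) : ∀ (fuel : Nat) (i : Int),
    pvLoopA t k fuel i =
      if ∃ j ∈ PySem.List.pyRange i (i + (fuel : Int)) 1,
          pvHelperA (PySem.List.slice t (some j) (some (j + k))) = 1 then 1 else 0 := by
  intro fuel
  induction fuel with
  | zero =>
      intro i
      rw [PySem.List.pyRange_one_eq_nil (by simp)]
      simp [pvLoopA]
  | succ f ih =>
      intro i
      rw [PySem.List.pyRange_one_cons (by push_cast; omega)]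
      have hb : i + ((f + 1 : Nat) : Int) = (i + 1) + (f : Int) := by push_cast; omega
      rw [hb]
      by_cases h : pvHelperA (PySem.List.slice t (some i) (some (i + k))) = 1
      · simp [pvLoopA, h]
      · rw [pvLoopA, if_neg h, ih (i + 1)]
        by_cases hex : ∃ j ∈ PySem.List.pyRange (i+1) ((i+1) + (f : Int)) 1,
            pvHelperA (PySem.List.slice t (some j) (some (j + k))) = 1
        · rw [if_pos hex, if_pos]
          obtain ⟨j, hj, hj1⟩ := hex
          exact ⟨j, List.mem_cons_of_mem _ hj, hj1⟩
        · rw [if_neg hex, if_neg]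
          rintro ⟨j, hj, hj1⟩
          rcases List.mem_cons.mp hj with rfl | hj2
          · exact h hj1
          · exact hex ⟨j, hj2, hj1⟩

lemma pyRange_zero_toNat (b : Int) :
    PySem.List.pyRange 0 ((b.toNat : Int)) 1 = PySem.List.pyRange 0 b 1 := by
  by_cases h : 0 ≤ b
  · rw [Int.toNat_of_nonneg h]
  · rw [PySem.List.pyRange_one_eq_nil (by omega), PySem.List.pyRange_one_eq_nil (by omega)]

lemma A_exists_iff (k : Int) (s : String) :
    (∃ i ∈ PySem.List.pyRange 0
        (((PySem.List.sorted s.toList (fun c => c) false).length : Int) - k + 1) 1,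
      pvHelperA (PySem.List.slice (PySem.List.sorted s.toList (fun c => c) false)
        (some i) (some (i + k))) = 1) ↔ pvP k s.toList := by
  set l := s.toList with hl
  set t := PySem.List.sorted l (fun c => c) false with ht
  have hperm : t.Perm l := PySem.List.sorted_perm l (fun c => c) false
  constructor
  · rintro ⟨i, hi, hhelp⟩
    by_cases hk : k ≤ 0
    · exact Or.inl hk
    · right
      rw [not_le] at hk
      have hmem := (PySem.List.mem_pyRange_one).mp hi
      obtain ⟨h0i, hilt⟩ := hmem
      obtain ⟨n, rfl⟩ := Int.eq_ofNat_of_zero_le h0i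
      obtain ⟨m, rfl⟩ := Int.eq_ofNat_of_zero_le (le_of_lt hk)
      rw [PySem.List.slice_natCast_add] at hhelp
      have hnm : n + m ≤ t.length := by
        have : (n : Int) < (t.length : Int) - m + 1 := hilt
        omega
      have hwlen : ((t.drop n).take m).length = m := by
        simp [List.length_take, List.length_drop]
        omega
      have hm1 : 1 ≤ m := by exact_mod_cast hk
      have hwne : (t.drop n).take m ≠ [] := by
        intro h
        rw [h] at hwlen
        simp at hwlen
        omega
      obtain ⟨c, hc⟩ := List.exists_mem_of_ne_nil _ hwne
      have hall := helper_all_eq _ hhelp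
      have hsub : List.Sublist ((t.drop n).take m) t :=
        (List.take_sublist m (t.drop n)).trans (List.drop_sublist n t)
      have hcw : ((t.drop n).take m).count c = ((t.drop n).take m).length := by
        rw [List.count_eq_length]
        intro b hb
        exact hall c hc b hb
      have hct : m ≤ t.count c := by
        have := hsub.count_le c
        omega
      have hcl : t.count c = l.count c := hperm.count_eq c
      refine ⟨c, ?_, ?_⟩
      · exact hperm.mem_iff.mp (hsub.subset hc)
      · rw [← hcl]
        exact_mod_cast hct
  · intro hp
    by_cases hk : k ≤ 0
    · -- k ≤ 0: index i = -k is in range and yields the empty slice, helper([]) = 1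
      refine ⟨-k, ?_, ?_⟩
      · rw [PySem.List.mem_pyRange_one]
        constructor <;> omega
      · have : PySem.List.slice t (some (-k)) (some (-k + k)) = [] := by
          have h0 : -k + k = ((0 : Nat) : Int) := by omega
          obtain ⟨m, hm⟩ := Int.eq_ofNat_of_zero_le (by omega : (0:Int) ≤ -k)
          rw [h0, hm, PySem.List.slice_natCast]
          simp
        rw [this]
        rfl
    · rcases hp with h0 | ⟨c, hc, hcount⟩
      · exact absurd h0 hk
      · rw [not_le] at hk
        obtain ⟨m, rfl⟩ := Int.eq_ofNat_of_zero_le (le_of_lt hk)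
        have hpair : t.Pairwise (· ≤ ·) := by
          have := PySem.List.sorted_pairwise l (fun c => c) (κ := Char)
          simpa using this
        have hcount' : m ≤ t.count c := by
          rw [hperm.count_eq c]
          exact_mod_cast hcount
        obtain ⟨n, hn, hw⟩ := window_of_count t c m hpair hcount'
        refine ⟨(n : Int), ?_, ?_⟩
        · rw [PySem.List.mem_pyRange_one]
          constructor
          · exact_mod_cast Nat.zero_le n
          · have : n + m ≤ t.length := hn
            omega
        · rw [PySem.List.slice_natCast_add, hw]
          exact helper_replicate m c

lemma A_eq_one (k : Int) (s : String)
    (h : ∃ i ∈ PySem.List.pyRange 0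
        (((PySem.List.sorted s.toList (fun c => c) false).length : Int) - k + 1) 1,
      pvHelperA (PySem.List.slice (PySem.List.sorted s.toList (fun c => c) false)
        (some i) (some (i + k))) = 1) :
    bored_chef k s = 1 := by
  unfold bored_chef
  rw [loopA_eq, zero_add, pyRange_zero_toNat, if_pos h]

lemma A_eq_zero (k : Int) (s : String)
    (h : ¬ ∃ i ∈ PySem.List.pyRange 0
        (((PySem.List.sorted s.toList (fun c => c) false).length : Int) - k + 1) 1,
      pvHelperA (PySem.List.slice (PySem.List.sorted s.toList (fun c => c) false)
        (some i) (some (i + k))) = 1) :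
    bored_chef k s = 0 := by
  unfold bored_chef
  rw [loopA_eq, zero_add, pyRange_zero_toNat, if_neg h]

-- ===== VERDICT (by name: the statement is the Claim_ definition above) =====
theorem bored_chef_spec : Claim_equal_bored_chef := by
  intro k s _
  unfold Spec_bored_chef
  by_cases h : pvP k s.toList
  · rw [A_eq_one k s ((A_exists_iff k s).mpr h)]
    exact ((altB_iff k s).mpr h).symm
  · rw [A_eq_zero k s (fun hx => h ((A_exists_iff k s).mp hx))]
    exact (altB_ne k s h).symm
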